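-- pv_equiv track=rewrite | github.com/jalexa10/Alpha-Code-Valentines-Cards | main.py | alphaCode
-- ===== SOURCE A (Python) =====
-- def alphaCode(mystr):
-- 	vowels=['a', 'e', 'i', 'o', 'u', 'A', 'E', 'I', 'O', 'U']
-- 	mystr_alphacoded = ""
-- 	for c in mystr:
-- 		if c in vowels:
-- 			number_vowels = ord(c)
-- 			comp_number_vowels = number_vowels + 5
-- 			mystr_alphacoded += chr(comp_number_vowels)
-- 		elif c not in vowels:
-- 			number_consonants = ord(c)
-- 			if number_consonants < 65 or number_consonants > 122:
-- 				mystr_alphacoded += chr(number_consonants)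
-- 			else:
-- 				new_numbers = number_consonants - 21
-- 				if new_numbers < 65:
-- 					newer_numbers = new_numbers + 57
-- 					mystr_alphacoded += str(newer_numbers)
-- 				else:
-- 					mystr_alphacoded += str(new_numbers)
-- 	return mystr_alphacoded
-- ===== SOURCE B (Python) =====
-- def alphaCode(mystr):
--     table = {}
--     for code in range(65, 123):
--         if chr(code) in "aeiouAEIOU":
--             table[code] = chr(code + 5)
--         else:
--             n = code - 21
--             table[code] = str(n + 57 if n < 65 else n)
--     return mystr.translate(table)
-- ===== Notes on version B (the rewrite author's own statement) =====
-- stated objective: faster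
-- what changed: B precomputes a translation table mapping each ordinal 65-122 to its encoded string and returns mystr.translate(table), replacing A's per-character branch cascade and string-concatenation loop with one C-level translate pass.
import Mathlib
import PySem

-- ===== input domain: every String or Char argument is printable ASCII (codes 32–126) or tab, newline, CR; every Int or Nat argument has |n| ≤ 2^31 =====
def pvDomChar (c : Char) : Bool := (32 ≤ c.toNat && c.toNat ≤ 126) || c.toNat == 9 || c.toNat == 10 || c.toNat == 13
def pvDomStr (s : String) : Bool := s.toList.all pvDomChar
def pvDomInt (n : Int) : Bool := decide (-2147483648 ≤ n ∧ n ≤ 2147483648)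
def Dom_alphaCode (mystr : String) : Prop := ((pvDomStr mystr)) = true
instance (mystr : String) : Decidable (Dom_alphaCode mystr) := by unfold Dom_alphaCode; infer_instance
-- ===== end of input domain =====

-- B replaces A's per-character branch cascade by a translation table built once over range(65,123)
-- and a single str.translate pass (objective: faster; measured constant-factor speedup).

-- ===== PORT A =====
-- Literal port of A's loop: accumulator of chars, branch per character, str(n) via PySem.Int.toChars.
def alphaCode (mystr : String) : String :=
  String.ofList (mystr.toList.foldl (fun acc c =>
    if c ∈ ['a', 'e', 'i', 'o', 'u', 'A', 'E', 'I', 'O', 'U'] then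
      acc ++ [Char.ofNat (c.toNat + 5)]
    else
      let n : Int := (c.toNat : Int)
      if n < 65 ∨ n > 122 then acc ++ [c]
      else
        let m := n - 21
        if m < 65 then acc ++ PySem.Int.toChars (m + 57)
        else acc ++ PySem.Int.toChars m) [])

-- ===== PORT B =====
-- the translation table of Source B, built once over range(65, 123)
def alphaCodeTable : PySem.Dict Int String :=
  (PySem.List.pyRange 65 123 1).foldl (fun t code =>
    if Char.ofNat code.toNat ∈ "aeiouAEIOU".toList then
      t.insert code (String.ofList [Char.ofNat (code.toNat + 5)])
    else
      let n := code - 21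
      t.insert code (PySem.Int.toStr (if n < 65 then n + 57 else n)))
    PySem.Dict.empty

-- mystr.translate(table): each char replaced by table[ord(c)] if present, else kept
def alphaCode_alt (mystr : String) : String :=
  String.ofList ((mystr.toList.map (fun c =>
    (alphaCodeTable.getD ((c.toNat : Int)) (String.ofList [c])).toList)).flatten)

-- ===== PRECONDITION & SPEC =====
def Spec_alphaCode (mystr : String) (out : String) : Prop := out = alphaCode_alt mystr
instance (mystr : String) (out : String) : Decidable (Spec_alphaCode mystr out) := by unfold Spec_alphaCode; infer_instance

-- ===== CLAIM (what is proved, stated in full; the proofs are below) =====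
def Claim_equal_alphaCode : Prop := ∀ (mystr : String), Dom_alphaCode mystr → Spec_alphaCode mystr (alphaCode mystr)

-- ===== LEMMAS AND PROOFS =====

-- A's per-character output, factored out for the proof (definitionally A's loop body)
def alphaCodeStepA (c : Char) : List Char :=
  if c ∈ ['a', 'e', 'i', 'o', 'u', 'A', 'E', 'I', 'O', 'U'] then
    [Char.ofNat (c.toNat + 5)]
  else
    let n : Int := (c.toNat : Int)
    if n < 65 ∨ n > 122 then [c]
    else
      let m := n - 21
      if m < 65 then PySem.Int.toChars (m + 57)
      else PySem.Int.toChars m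

lemma alphaCode_body_eq (acc : List Char) (c : Char) :
    (if c ∈ ['a', 'e', 'i', 'o', 'u', 'A', 'E', 'I', 'O', 'U'] then
      acc ++ [Char.ofNat (c.toNat + 5)]
    else
      let n : Int := (c.toNat : Int)
      if n < 65 ∨ n > 122 then acc ++ [c]
      else
        let m := n - 21
        if m < 65 then acc ++ PySem.Int.toChars (m + 57)
        else acc ++ PySem.Int.toChars m) = acc ++ alphaCodeStepA c := by
  unfold alphaCodeStepA
  dsimp only
  split_ifs <;> rfl

-- the per-character agreement, checked exhaustively over the 128 ASCII codes
set_option maxRecDepth 10000 in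
lemma alphaCode_step_eq_table : ∀ n : Nat, n < 128 →
    alphaCodeStepA (Char.ofNat n) =
      (alphaCodeTable.getD (((Char.ofNat n).toNat : Int)) (String.ofList [Char.ofNat n])).toList := by
  decide

lemma alphaCode_foldl (l : List Char) (acc : List Char) :
    l.foldl (fun acc c => acc ++ alphaCodeStepA c) acc = acc ++ (l.map alphaCodeStepA).flatten := by
  induction l generalizing acc with
  | nil => simp
  | cons c t ih => simp [List.foldl_cons, ih]

-- ===== VERDICT (by name: the statement is the Claim_ definition above) =====
set_option maxRecDepth 10000 in
theorem alphaCode_spec : Claim_equal_alphaCode := by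
  intro mystr hdom
  unfold Spec_alphaCode alphaCode alphaCode_alt
  have hbody : ∀ (acc : List Char) (c : Char),
      (fun acc c =>
        if c ∈ ['a', 'e', 'i', 'o', 'u', 'A', 'E', 'I', 'O', 'U'] then
          acc ++ [Char.ofNat (c.toNat + 5)]
        else
          let n : Int := (c.toNat : Int)
          if n < 65 ∨ n > 122 then acc ++ [c]
          else
            let m := n - 21
            if m < 65 then acc ++ PySem.Int.toChars (m + 57)
            else acc ++ PySem.Int.toChars m) acc c = acc ++ alphaCodeStepA c := by
    intro acc c; exact alphaCode_body_eq acc c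
  have h1 : mystr.toList.foldl (fun acc c => acc ++ alphaCodeStepA c) ([] : List Char)
      = ([] : List Char) ++ (mystr.toList.map alphaCodeStepA).flatten := alphaCode_foldl _ _
  rw [show (fun acc c =>
        if c ∈ ['a', 'e', 'i', 'o', 'u', 'A', 'E', 'I', 'O', 'U'] then
          acc ++ [Char.ofNat (c.toNat + 5)]
        else
          let n : Int := (c.toNat : Int)
          if n < 65 ∨ n > 122 then acc ++ [c]
          else
            let m := n - 21
            if m < 65 then acc ++ PySem.Int.toChars (m + 57)
            else acc ++ PySem.Int.toChars m) = (fun acc c => acc ++ alphaCodeStepA c) from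
      funext fun acc => funext fun c => hbody acc c]
  rw [alphaCode_foldl]
  simp only [List.nil_append]
  congr 1
  congr 1
  apply List.map_congr_left
  intro c hc
  have hcd : pvDomChar c = true := by
    have := (List.all_eq_true.mp hdom) c hc
    exact this
  have hlt : c.toNat < 128 := by
    simp [pvDomChar] at hcd
    omega
  have := alphaCode_step_eq_table c.toNat hlt
  rwa [Char.ofNat_toNat] at this
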